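-- pv_equiv track=rewrite | github.com/uryadova1/-distributed-information-systems | worker/main.py | _index_to_word
-- ===== SOURCE A (Python) =====
-- def _index_to_word(index: int, alphabet: str, max_length: int) -> str:
--     """Переводит глобальный индекс (по всем длинам) в слово."""
--     base = len(alphabet)
--     for length in range(1, max_length + 1):
--         count = base ** length
--         if index < count:
--             return _number_to_word(index, alphabet, length)
--         index -= count
--     return ""   # не должно случиться при корректном диапазоне
--
-- def _number_to_word(number: int, alphabet: str, length: int) -> str:
--     base  = len(alphabet)
--     chars = []
--     for _ in range(length):
--         chars.append(alphabet[number % base])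
--         number //= base
--     return "".join(reversed(chars))
-- ===== SOURCE B (Python) =====
-- def _index_to_word(index: int, alphabet: str, max_length: int) -> str:
--     """Bijective base-N conversion of index+1; a word longer than max_length
--     (detected when the digit cap is hit) means the index is out of range."""
--     base = len(alphabet)
--     if index < 0:
--         return ""
--     m = index + 1
--     chars = []
--     while m > 0:
--         if base == 0 or len(chars) >= max_length:
--             return ""  # index out of range for this alphabet / max_length
--         m -= 1
--         chars.append(alphabet[m % base])
--         m //= base
--     return "".join(reversed(chars))
-- ===== Notes on version B (the rewrite author's own statement) =====
-- stated objective: simpler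
-- what changed: Replaces the length-bucket subtraction loop plus the separate fixed-length digit loop by a single bijective base-N digit loop on index+1, detecting an out-of-range index when the digit count would exceed max_length.
-- intended difference: On a negative index with nonempty alphabet and max_length >= 1, A returns the single character alphabet[index % base] (an accident of Python's modulo wraparound) while B returns "", the out-of-range result A's own fallthrough comment intends. — e.g. on _index_to_word(-1, "ab", 3): A returns "b", B returns ""
import Mathlib
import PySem

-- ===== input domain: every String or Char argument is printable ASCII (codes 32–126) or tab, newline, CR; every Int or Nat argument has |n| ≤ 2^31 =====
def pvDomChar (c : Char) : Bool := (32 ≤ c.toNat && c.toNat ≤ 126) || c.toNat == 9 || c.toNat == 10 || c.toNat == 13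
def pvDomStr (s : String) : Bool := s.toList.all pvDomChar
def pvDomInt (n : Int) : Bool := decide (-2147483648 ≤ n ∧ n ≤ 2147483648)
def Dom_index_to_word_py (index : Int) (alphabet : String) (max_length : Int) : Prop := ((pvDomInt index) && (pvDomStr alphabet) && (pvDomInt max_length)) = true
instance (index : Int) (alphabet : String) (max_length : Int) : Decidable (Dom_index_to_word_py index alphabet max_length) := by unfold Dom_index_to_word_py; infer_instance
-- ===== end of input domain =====

-- B replaces A's length-bucket scan plus fixed-length digit loop by one bijective
-- base-N conversion of index+1 after a closed range check (objective: simpler).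

-- ===== PORT A =====
-- helper: the digit loop of _number_to_word ('for _ in range(length)')
def nwLoopA (al : List Char) (base : Int) : Nat → Int → List Char → List Char
  | 0, _, chars => chars
  | n + 1, number, chars =>
      nwLoopA al base n (PySem.Int.floordiv number base)
        (chars ++ [(PySem.List.pyGet? al (PySem.Int.mod number base)).getD ' '])

-- helper: _number_to_word
def numberToWordA (number : Int) (alphabet : String) (length : Int) : String :=
  let base : Int := PySem.Str.len alphabet
  String.ofList (nwLoopA alphabet.toList base length.toNat number []).reverse

-- helper: 'for length in range(1, max_length + 1)' with early return, as fuel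
-- recursion on the number of remaining lengths (range(1, max_length+1) has
-- max_length.toNat elements; length counts up from 1)
def itwLoopA (alphabet : String) (base : Int) : Nat → Int → Int → String
  | 0, _, _ => ""
  | fuel + 1, length, index =>
      let count := base ^ length.toNat
      if index < count then numberToWordA index alphabet length
      else itwLoopA alphabet base fuel (length + 1) (index - count)

def index_to_word_py (index : Int) (alphabet : String) (max_length : Int) : String :=
  let base : Int := PySem.Str.len alphabet
  itwLoopA alphabet base max_length.toNat 1 index

-- ===== PORT B =====
-- helper: B's 'while m > 0' bijective-base digit loop with its in-loop
-- out-of-range check ('if base == 0 or len(chars) >= max_length: return ""')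
def bijLoopB (al : List Char) (base : Int) (maxLength : Int) (m : Int) (chars : List Char) : String :=
  if hm : 0 < m then
    if base = 0 ∨ maxLength ≤ (chars.length : Int) then ""
    else
      bijLoopB al base maxLength (PySem.Int.floordiv (m - 1) base)
        (chars ++ [(PySem.List.pyGet? al (PySem.Int.mod (m - 1) base)).getD ' '])
  else String.ofList chars.reverse
termination_by m.toNat
decreasing_by
  rename_i hguard
  simp only [PySem.Int.floordiv]
  rcases lt_trichotomy base 0 with hb | hb | hb
  · have h0 : Int.fdiv (m - 1) base ≤ 0 := by
      rw [Int.fdiv_eq_ediv]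
      have h1 : (m - 1) / base ≤ 0 := Int.ediv_nonpos_of_nonneg_of_nonpos (by omega) (by omega)
      split_ifs <;> omega
    omega
  · exact absurd (Or.inl hb) hguard
  · rw [Int.fdiv_eq_ediv_of_nonneg (m - 1) (by omega : (0:Int) ≤ base)]
    have h1 : 0 ≤ (m - 1) / base := Int.ediv_nonneg (by omega) (by omega)
    have h2 : (m - 1) / base ≤ m - 1 := Int.ediv_le_self _ (by omega)
    omega

def index_to_word_py_alt (index : Int) (alphabet : String) (max_length : Int) : String :=
  let base : Int := PySem.Str.len alphabet
  if index < 0 then ""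
  else bijLoopB alphabet.toList base max_length (index + 1) []

-- ===== PRECONDITION & SPEC =====
-- Pre_ excludes exactly the inputs where A raises ZeroDivisionError: a negative
-- index with an empty alphabet and max_length ≥ 1 (then alphabet[index % 0] is evaluated).
def Pre_index_to_word_py (index : Int) (alphabet : String) (max_length : Int) : Prop :=
  ¬ (index < 0 ∧ alphabet = "" ∧ 1 ≤ max_length)
instance (index : Int) (alphabet : String) (max_length : Int) : Decidable (Pre_index_to_word_py index alphabet max_length) := by unfold Pre_index_to_word_py; infer_instance
def pvWitness_index_to_word_py : Int × String × Int := (5, "ab", 3)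

-- On a negative index with nonempty alphabet and max_length >= 1, A returns the single
-- character alphabet[index % base] (Python modulo wraparound); B returns "", the
-- out-of-range result A's own fallthrough comment intends.
def D_index_to_word_py (index : Int) (alphabet : String) (max_length : Int) : Prop :=
  index < 0 ∧ alphabet ≠ "" ∧ 1 ≤ max_length
instance (index : Int) (alphabet : String) (max_length : Int) : Decidable (D_index_to_word_py index alphabet max_length) := by unfold D_index_to_word_py; infer_instance

def Spec_index_to_word_py (index : Int) (alphabet : String) (max_length : Int) (out : String) : Prop := ¬ D_index_to_word_py index alphabet max_length → out = index_to_word_py_alt index alphabet max_length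
instance (index : Int) (alphabet : String) (max_length : Int) (out : String) : Decidable (Spec_index_to_word_py index alphabet max_length out) := by unfold Spec_index_to_word_py; infer_instance

def pvDiffWitness_index_to_word_py : Int × String × Int := (-1, "ab", 3)
def pvDiffWitnessOut_index_to_word_py : String × String := ("b", "")

-- ===== CLAIM (what is proved, stated in full; the proofs are below) =====
def Claim_unchanged_index_to_word_py : Prop := ∀ (index : Int) (alphabet : String) (max_length : Int), Dom_index_to_word_py index alphabet max_length → Pre_index_to_word_py index alphabet max_length → Spec_index_to_word_py index alphabet max_length (index_to_word_py index alphabet max_length)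
def Claim_changed_index_to_word_py : Prop := Dom_index_to_word_py (pvDiffWitness_index_to_word_py.1) (pvDiffWitness_index_to_word_py.2.1) (pvDiffWitness_index_to_word_py.2.2) ∧ Pre_index_to_word_py (pvDiffWitness_index_to_word_py.1) (pvDiffWitness_index_to_word_py.2.1) (pvDiffWitness_index_to_word_py.2.2) ∧ D_index_to_word_py (pvDiffWitness_index_to_word_py.1) (pvDiffWitness_index_to_word_py.2.1) (pvDiffWitness_index_to_word_py.2.2) ∧ index_to_word_py (pvDiffWitness_index_to_word_py.1) (pvDiffWitness_index_to_word_py.2.1) (pvDiffWitness_index_to_word_py.2.2) = pvDiffWitnessOut_index_to_word_py.1 ∧ index_to_word_py_alt (pvDiffWitness_index_to_word_py.1) (pvDiffWitness_index_to_word_py.2.1) (pvDiffWitness_index_to_word_py.2.2) = pvDiffWitnessOut_index_to_word_py.2 ∧ pvDiffWitnessOut_index_to_word_py.1 ≠ pvDiffWitnessOut_index_to_word_py.2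
def Claim_exact_index_to_word_py : Prop := ∀ (index : Int) (alphabet : String) (max_length : Int), Dom_index_to_word_py index alphabet max_length → Pre_index_to_word_py index alphabet max_length → D_index_to_word_py index alphabet max_length → index_to_word_py index alphabet max_length ≠ index_to_word_py_alt index alphabet max_length

-- ===== LEMMAS AND PROOFS =====

-- gsum b k = 1 + b + … + b^(k-1): the bijective-numeral offset for k remaining digits
def gsum (b : Int) (k : Nat) : Int := ((List.range k).map (fun i => b ^ i)).sum

theorem gsum_succ' (b : Int) (k : Nat) : gsum b (k + 1) = gsum b k + b ^ k := by
  simp [gsum, List.range_succ]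

theorem gsum_succ (b : Int) (k : Nat) : gsum b (k + 1) = 1 + b * gsum b k := by
  induction k with
  | zero => simp [gsum]
  | succ k ih =>
      rw [gsum_succ' b (k+1), ih]
      have h2 : gsum b k + b ^ k = 1 + b * gsum b k := by rw [← gsum_succ']; exact ih
      linear_combination b * h2

theorem gsum_nonneg (b : Int) (hb : 0 ≤ b) (k : Nat) : 0 ≤ gsum b k := by
  induction k with
  | zero => simp [gsum]
  | succ k ih => rw [gsum_succ']; positivity

-- the bucket sum Σ_{j<n} b^(k+j): the counts A's loop subtracts from index
def bsum (b : Int) : Nat → Int → Int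
  | 0, _ => 0
  | n + 1, k => b ^ k.toNat + bsum b n (k + 1)

theorem bsum_nonneg (b : Int) (hb : 0 ≤ b) : ∀ (n : Nat) (k : Int), 0 ≤ bsum b n k := by
  intro n
  induction n with
  | zero => intro k; simp [bsum]
  | succ n ih =>
      intro k
      have h1 : 0 ≤ b ^ k.toNat := by positivity
      have h2 := ih (k + 1)
      simp only [bsum]
      omega

-- bsum as a difference of gsum offsets (used to turn 'index ≥ total' into 'm ≥ gsum')
theorem bsum_eq_gsum (b : Int) : ∀ (n : Nat) (k : Int), 0 ≤ k →
    bsum b n k = gsum b (k.toNat + n) - gsum b k.toNat := by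
  intro n
  induction n with
  | zero => intro k hk; simp [bsum]
  | succ n ih =>
      intro k hk
      have htn : (k + 1).toNat = k.toNat + 1 := by omega
      simp only [bsum]
      rw [ih (k + 1) (by omega), htn,
        show k.toNat + (n + 1) = (k.toNat + 1) + n by omega, gsum_succ' b k.toNat]
      ring

-- digit-word lemma: with k digits left (fitting the cap) and 0 ≤ r < b^k, B's
-- bijective loop at m = r + gsum b k produces exactly A's fixed-length digit word on r
theorem bij_eq_nw (al : List Char) (k : Nat) :
    ∀ (r : Int) (acc : List Char) (ml : Int), 0 ≤ r → r < (al.length : Int) ^ k →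
    (acc.length : Int) + k ≤ ml →
    bijLoopB al (al.length : Int) ml (r + gsum (al.length : Int) k) acc
      = String.ofList (nwLoopA al (al.length : Int) k r acc).reverse := by
  induction k with
  | zero =>
      intro r acc ml h0 h1 hcap
      have hr : r = 0 := by rw [pow_zero] at h1; omega
      subst hr
      rw [bijLoopB]
      simp [gsum, nwLoopA]
  | succ k ih =>
      intro r acc ml h0 h1 hcap
      have hb : 0 < (al.length : Int) := by
        by_contra h
        have : (al.length : Int) = 0 := by omega
        rw [this] at h1
        simp at h1
        omega
      have hm : 0 < r + gsum (al.length : Int) (k + 1) := by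
        have := gsum_nonneg (al.length : Int) (by omega) k
        rw [gsum_succ]
        nlinarith
      rw [bijLoopB]
      rw [dif_pos hm, if_neg (by push_neg; exact ⟨by omega, by omega⟩)]
      have harg : r + gsum (al.length : Int) (k + 1) - 1
          = r + (al.length : Int) * gsum (al.length : Int) k := by
        rw [gsum_succ]; ring
      rw [harg]
      have hmod : PySem.Int.mod (r + (al.length : Int) * gsum (al.length : Int) k) (al.length : Int)
          = PySem.Int.mod r (al.length : Int) := by
        rw [PySem.Int.mod_eq_emod_of_pos hb, PySem.Int.mod_eq_emod_of_pos hb]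
        exact Int.add_mul_emod_self_left _ _ _
      have hdiv : PySem.Int.floordiv (r + (al.length : Int) * gsum (al.length : Int) k) (al.length : Int)
          = PySem.Int.floordiv r (al.length : Int) + gsum (al.length : Int) k := by
        rw [PySem.Int.floordiv_eq_ediv_of_pos hb, PySem.Int.floordiv_eq_ediv_of_pos hb]
        exact Int.add_mul_ediv_left r _ (by omega)
      rw [hmod, hdiv]
      rw [ih (PySem.Int.floordiv r (al.length : Int)) _ ml ?_ ?_ (by simp; omega)]
      · rfl
      · rw [PySem.Int.floordiv_eq_ediv_of_pos hb]
        exact Int.ediv_nonneg h0 (by omega)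
      · rw [PySem.Int.floordiv_eq_ediv_of_pos hb]
        rw [Int.ediv_lt_iff_lt_mul hb]
        calc r < (al.length : Int) ^ (k + 1) := h1
        _ = (al.length : Int) ^ k * (al.length : Int) := by ring

-- overflow lemma: if m exceeds the count of words fitting in the remaining cap,
-- B's loop runs into the cap and returns ""
theorem bij_overflow (al : List Char) :
    ∀ (k : Nat) (m ml : Int) (chars : List Char),
    gsum (al.length : Int) (k + 1) ≤ m → ml ≤ (chars.length : Int) + k →
    bijLoopB al (al.length : Int) ml m chars = "" := by
  intro k
  induction k with
  | zero =>
      intro m ml chars hm hcap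
      have h1 : 0 < m := by simp [gsum] at hm; omega
      rw [bijLoopB, dif_pos h1, if_pos (Or.inr (by omega))]
  | succ k ih =>
      intro m ml chars hm hcap
      have hg : 0 ≤ gsum (al.length : Int) (k + 1) := gsum_nonneg _ (by positivity) _
      have h1 : 0 < m := by rw [gsum_succ] at hm; nlinarith [Int.natCast_nonneg al.length]
      rw [bijLoopB, dif_pos h1]
      by_cases hcap2 : (al.length : Int) = 0 ∨ ml ≤ (chars.length : Int)
      · rw [if_pos hcap2]
      · rw [if_neg hcap2]
        push_neg at hcap2
        have hb : 0 < (al.length : Int) := by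
          have := Int.natCast_nonneg al.length
          omega
        apply ih
        · rw [PySem.Int.floordiv_eq_ediv_of_pos hb, Int.le_ediv_iff_mul_le hb]
          rw [gsum_succ (al.length : Int) (k + 1)] at hm
          nlinarith
        · simp
          omega

-- fallthrough lemma: if idx is at least the remaining bucket sum, A's loop returns ""
theorem itwLoopA_fallthrough (alphabet : String) (b : Int) (hb : 0 ≤ b) :
    ∀ (n : Nat) (k idx : Int), bsum b n k ≤ idx →
    itwLoopA alphabet b n k idx = "" := by
  intro n
  induction n with
  | zero => intro k idx _; rfl
  | succ n ih =>
      intro k idx hle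
      simp only [bsum] at hle
      have hrest : 0 ≤ bsum b n (k + 1) := bsum_nonneg b hb n (k + 1)
      simp only [itwLoopA]
      rw [if_neg (by omega)]
      exact ih (k + 1) (idx - b ^ k.toNat) (by omega)

-- bucket lemma: inside the range, A's bucket scan equals B's single conversion
theorem itwLoopA_found (alphabet : String) :
    ∀ (n : Nat) (k idx ml : Int), 1 ≤ k → 0 ≤ idx → k + (n : Int) = ml + 1 →
    idx < bsum (PySem.Str.len alphabet) n k →
    itwLoopA alphabet (PySem.Str.len alphabet) n k idx
      = bijLoopB alphabet.toList (PySem.Str.len alphabet) ml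
          (idx + gsum (PySem.Str.len alphabet) k.toNat) [] := by
  intro n
  induction n with
  | zero =>
      intro k idx ml hk h0 hml hlt
      simp [bsum] at hlt
      omega
  | succ n ih =>
      intro k idx ml hk h0 hml hlt
      simp only [bsum] at hlt
      simp only [itwLoopA, numberToWordA]
      by_cases hc : idx < (PySem.Str.len alphabet) ^ k.toNat
      · rw [if_pos hc]
        have hlen : PySem.Str.len alphabet = (alphabet.toList.length : Int) := PySem.Str.len_eq alphabet
        rw [hlen] at hc ⊢
        rw [bij_eq_nw alphabet.toList k.toNat idx [] ml h0 hc (by simp only [List.length_nil, Nat.cast_zero, zero_add]; omega)]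
      · rw [if_neg hc]
        have htn : (k + 1).toNat = k.toNat + 1 := by omega
        rw [ih (k + 1) (idx - (PySem.Str.len alphabet) ^ k.toNat) ml (by omega)
            (by omega) (by push_cast at hml ⊢; omega) (by omega)]
        rw [htn, gsum_succ',
          show idx - (PySem.Str.len alphabet) ^ k.toNat
              + (gsum (PySem.Str.len alphabet) k.toNat + (PySem.Str.len alphabet) ^ k.toNat)
              = idx + gsum (PySem.Str.len alphabet) k.toNat from by ring]

theorem str_len_nonneg (alphabet : String) : 0 ≤ PySem.Str.len alphabet := by
  rw [PySem.Str.len_eq]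
  positivity

-- ===== VERDICT (by name: the statement is the Claim_ definition above) =====
theorem index_to_word_py_spec : Claim_unchanged_index_to_word_py := by
  intro index alphabet max_length hdom hpre hnd
  simp only [index_to_word_py, index_to_word_py_alt]
  by_cases hi : index < 0
  · rw [if_pos hi]
    by_cases hml : max_length < 1
    · have hn : max_length.toNat = 0 := by omega
      rw [hn]
      rfl
    · have hal : alphabet = "" := by
        by_contra h
        exact hnd ⟨hi, h, by omega⟩
      exact absurd ⟨hi, hal, by omega⟩ hpre
  · rw [if_neg hi]
    have hb := str_len_nonneg alphabet
    have hlen : PySem.Str.len alphabet = (alphabet.toList.length : Int) := PySem.Str.len_eq alphabet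
    by_cases ht : bsum (PySem.Str.len alphabet) max_length.toNat 1 ≤ index
    · rw [itwLoopA_fallthrough alphabet (PySem.Str.len alphabet) hb max_length.toNat 1 index ht]
      rw [bsum_eq_gsum _ _ 1 (by omega)] at ht
      rw [hlen] at ht ⊢
      have hgs : gsum ((alphabet.toList.length : Nat) : Int) (max_length.toNat + 1) ≤ index + 1 := by
        have hg1 : gsum ((alphabet.toList.length : Nat) : Int) ((1:Int).toNat) = 1 := by
          simp [gsum]
        rw [show (1:Int).toNat + max_length.toNat = max_length.toNat + 1 by omega, hg1] at ht
        omega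
      have hcap : (max_length : Int) ≤ (([] : List Char).length : Int) + max_length.toNat := by
        simp only [List.length_nil, Nat.cast_zero, zero_add]
        omega
      rw [bij_overflow alphabet.toList max_length.toNat (index + 1) max_length [] hgs hcap]
    · have hml1 : 1 ≤ max_length := by
        by_contra h
        have : max_length.toNat = 0 := by omega
        rw [this] at ht
        simp [bsum] at ht
        omega
      rw [itwLoopA_found alphabet max_length.toNat 1 index max_length (by omega) (by omega)
          (by omega) (by omega)]
      have : gsum (PySem.Str.len alphabet) (1 : Int).toNat = 1 := by simp [gsum]
      rw [this, hlen]

theorem index_to_word_py_changed : Claim_changed_index_to_word_py := by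
  unfold Claim_changed_index_to_word_py; decide

theorem index_to_word_py_tight : Claim_exact_index_to_word_py := by
  intro index alphabet max_length hdom hpre hd
  obtain ⟨hi, hal, hml⟩ := hd
  have hlen : PySem.Str.len alphabet = (alphabet.toList.length : Int) := PySem.Str.len_eq alphabet
  have hb1 : 1 ≤ PySem.Str.len alphabet := by
    rw [hlen]
    have : alphabet.toList ≠ [] := by
      intro h
      apply hal
      have := congrArg String.ofList h
      simpa using this
    have := List.length_pos_iff.mpr this
    omega
  simp only [index_to_word_py, index_to_word_py_alt]
  have hfuel : max_length.toNat = (max_length.toNat - 1) + 1 := by omega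
  rw [hfuel]
  simp only [itwLoopA, numberToWordA]
  rw [if_pos (show index < (PySem.Str.len alphabet) ^ (1:Int).toNat by rw [show ((1:Int)).toNat = 1 from rfl, pow_one]; omega)]
  rw [if_pos hi]
  simp only [show ((1:Int)).toNat = 1 from rfl, nwLoopA]
  intro h
  have := congrArg String.toList h
  simp at this
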